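-- pv_equiv track=rewrite | github.com/ssaldarris/ST0245-032 | talleres/taller04/Turing.py | turing
-- ===== SOURCE A (Python) =====
-- def turing(array, length):
--     maxi=array[length]
--     temp=0
--     if length==0:
--         maxi= array[0]
--     elif length!=0:
--         temp= turing(array, length-1)
--         if temp>maxi:
--             maxi=temp
--     return maxi
-- ===== SOURCE B (Python) =====
-- def turing(array, length):
--     maxi = array[length]
--     for i in range(length):
--         if array[i] > maxi:
--             maxi = array[i]
--     return maxi
-- ===== Notes on version B (the rewrite author's own statement) =====
-- stated objective: simpler
-- what changed: Replaces the recursive descent (one call frame per index, max combined on the way back up) with a single iterative scan keeping a running maximum in O(1) space.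
import Mathlib
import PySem

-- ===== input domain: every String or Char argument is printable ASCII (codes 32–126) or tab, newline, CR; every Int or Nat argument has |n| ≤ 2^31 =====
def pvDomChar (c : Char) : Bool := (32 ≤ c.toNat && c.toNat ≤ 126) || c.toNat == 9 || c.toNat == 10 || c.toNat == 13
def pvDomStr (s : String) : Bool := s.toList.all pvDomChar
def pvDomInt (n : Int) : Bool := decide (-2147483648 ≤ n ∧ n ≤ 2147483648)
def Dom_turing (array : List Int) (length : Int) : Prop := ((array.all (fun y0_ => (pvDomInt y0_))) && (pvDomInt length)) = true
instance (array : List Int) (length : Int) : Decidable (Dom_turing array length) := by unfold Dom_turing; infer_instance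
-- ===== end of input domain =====

-- B replaces A's recursive descent by a single iterative scan with a running maximum.

-- ===== PORT A =====
-- A recurses on length-1; inside Pre_ (0 ≤ length < |array|) this is recursion on the
-- natural number length.toNat, transcribed step for step.
def turingA (array : List Int) (n : Nat) : Int :=
  let maxi := (PySem.List.pyGet? array (n : Int)).getD 0
  if n = 0 then (PySem.List.pyGet? array 0).getD 0
  else
    let temp := turingA array (n - 1)
    if temp > maxi then temp else maxi
termination_by n
decreasing_by omega

def turing (array : List Int) (length : Int) : Int :=
  turingA array length.toNat

-- ===== PORT B =====
def turing_alt (array : List Int) (length : Int) : Int :=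
  let maxi := (PySem.List.pyGet? array length).getD 0
  (PySem.List.pyRange 0 length 1).foldl
    (fun maxi i =>
      let v := (PySem.List.pyGet? array i).getD 0
      if v > maxi then v else maxi) maxi

-- ===== PRECONDITION & SPEC =====
-- Pre_ excludes exactly the inputs where the Python A raises: length ≥ len(array) hits an
-- IndexError at once, and a negative length recurses without bound (RecursionError).
def Pre_turing (array : List Int) (length : Int) : Prop :=
  0 ≤ length ∧ length < array.length
instance (array : List Int) (length : Int) : Decidable (Pre_turing array length) := by
  unfold Pre_turing; infer_instance

def pvWitness_turing : List Int × Int := ([3, 1, 5, 2], 2)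

def Spec_turing (array : List Int) (length : Int) (out : Int) : Prop := out = turing_alt array length
instance (array : List Int) (length : Int) (out : Int) : Decidable (Spec_turing array length out) := by unfold Spec_turing; infer_instance

-- ===== CLAIM (what is proved, stated in full; the proofs are below) =====
def Claim_equal_turing : Prop := ∀ (array : List Int) (length : Int), Dom_turing array length → Pre_turing array length → Spec_turing array length (turing array length)

-- ===== LEMMAS AND PROOFS =====

-- The step function of both programs is the binary max with the element read.
theorem step_eq_max (array : List Int) :
    (fun (maxi i : Int) =>
      let v := (PySem.List.pyGet? array i).getD 0
      if v > maxi then v else maxi)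
    = fun (maxi i : Int) => max ((PySem.List.pyGet? array i).getD 0) maxi := by
  funext maxi i
  simp only [max_def]
  split_ifs <;> omega

-- Folding max over a list commutes with taking max at the seed.
theorem foldl_max_init (g : Int → Int) (l : List Int) (a b : Int) :
    l.foldl (fun m i => max (g i) m) (max a b)
      = max a (l.foldl (fun m i => max (g i) m) b) := by
  induction l generalizing b with
  | nil => simp
  | cons x xs ih =>
    simp only [List.foldl]
    rw [show max (g x) (max a b) = max a (max (g x) b) by
          rw [max_left_comm], ih]

-- A's recursion equals B's left fold over range(0, n), unconditionally.
theorem turingA_eq_fold (array : List Int) (n : Nat) :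
    turingA array n =
      (PySem.List.pyRange 0 (n : Int) 1).foldl
        (fun maxi i =>
          let v := (PySem.List.pyGet? array i).getD 0
          if v > maxi then v else maxi)
        ((PySem.List.pyGet? array (n : Int)).getD 0) := by
  rw [step_eq_max]
  induction n with
  | zero =>
    rw [turingA]; simp
  | succ m ih =>
    have hrange : PySem.List.pyRange 0 ((m : Int) + 1) 1
        = PySem.List.pyRange 0 (m : Int) 1 ++ [(m : Int)] :=
      PySem.List.pyRange_one_succ_right (by exact_mod_cast Nat.zero_le m)
    have hA : turingA array (m + 1)
        = max (turingA array m) ((PySem.List.pyGet? array ((m : Int) + 1)).getD 0) := by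
      rw [turingA]
      simp only [Nat.add_one_ne_zero, if_false, Nat.add_sub_cancel]
      push_cast
      simp only [max_def]
      split_ifs <;> omega
    rw [hA, ih]
    push_cast
    rw [hrange, List.foldl_append]
    simp only [List.foldl]
    set g := fun i : Int => (PySem.List.pyGet? array i).getD 0 with hg
    set l := PySem.List.pyRange 0 (m : Int) 1 with hl
    -- LHS: max (fold l (g m)) (g (m+1));  RHS: max (g m) (fold l (g (m+1)))
    calc max (l.foldl (fun m i => max (g i) m) (g (m : Int))) (g ((m : Int) + 1))
        = max (g ((m : Int) + 1)) (l.foldl (fun m i => max (g i) m) (g (m : Int))) := by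
          rw [max_comm]
      _ = l.foldl (fun m i => max (g i) m) (max (g ((m : Int) + 1)) (g (m : Int))) := by
          rw [foldl_max_init]
      _ = l.foldl (fun m i => max (g i) m) (max (g (m : Int)) (g ((m : Int) + 1))) := by
          rw [max_comm (g ((m : Int) + 1))]
      _ = max (g (m : Int)) (l.foldl (fun m i => max (g i) m) (g ((m : Int) + 1))) := by
          rw [foldl_max_init]

-- ===== VERDICT (by name: the statement is the Claim_ definition above) =====
theorem turing_spec : Claim_equal_turing := by
  intro array length _hdom hpre
  unfold Spec_turing turing turing_alt
  have hcast : (length.toNat : Int) = length := Int.toNat_of_nonneg hpre.1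
  rw [turingA_eq_fold array length.toNat, hcast]
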